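/- GENERATED by c/gen_decode.py: decode facts of the image, one per distinct instruction byte string. -/
import UserX.DecodeImage

#decode_all ProgX.Base.Dec
  "40f6c701"  -- test dil,0x1
  "4839c7"  -- cmp rdi,rax
  "4889042520f01f00"  -- mov QWORD PTR ds:0x1ff020,rax
  "4889fd"  -- mov rbp,rdi
  "48c1e903"  -- shr rcx,0x3
  "498d2c1e"  -- lea rbp,[r14+rbx*1]
  "4d8d241f"  -- lea r12,[r15+rbx*1]
  "660f57052ddb0300"  -- xorpd xmm0,XMMWORD PTR [rip+0x3db2d]
  "7418"  -- je 100263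
  "771b"  -- ja 10432e
  "83e003"  -- and eax,0x3
  "bd00000000"  -- mov ebp,0x0
  "e858fdffff"  -- call 102380
  "e8d4f0ffff"  -- call 100300
  "eb1f"  -- jmp 1024fb
  "f20f100d6edd0300"  -- movsd xmm1,QWORD PTR [rip+0x3dd6e]
  "f20f58d2"  -- addsd xmm2,xmm2
  "f20f5cc2"  -- subsd xmm0,xmm2
  "f20f5e1df4e10300"  -- divsd xmm3,QWORD PTR [rip+0x3e1f4]
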